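-- pv_equiv track=rewrite | github.com/mgiannopoulos24/Leetcode | Python/1655.py | canDistribute
-- ===== SOURCE A (Python) =====
-- from typing import List
--
-- from collections import Counter
--
-- def canDistribute(nums: List[int], quantity: List[int]) -> bool:
--     # Count frequencies of numbers in nums
--     freq = list(Counter(nums).values())
--
--     # Sort quantities in descending order for optimization
--     quantity.sort(reverse=True)
--
--     # Helper function to use backtracking to check all possibilities
--     def backtrack(index):
--         if index == len(quantity):
--             return True
--
--         for i in range(len(freq)):
--             if freq[i] >= quantity[index]:
--                 # Try assigning the current quantity to this frequency
--                 freq[i] -= quantity[index]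
--                 if backtrack(index + 1):
--                     return True
--                 # Backtrack if this assignment fails
--                 freq[i] += quantity[index]
--
--         return False
--
--     # Start backtracking from the first customer
--     return backtrack(0)
-- ===== SOURCE B (Python) =====
-- from typing import List
-- from collections import Counter
--
-- def canDistribute(nums: List[int], quantity: List[int]) -> bool:
--     # Subset-peeling DP: keep the set of possible "remaining demand" tuples;
--     # each stock bucket (a frequency f) serves any subset of the remaining
--     # quantities whose total is at most f.  (Does not mutate `quantity`.)
--     memo = {}
--
--     def leftovers(xs, budget):
--         # set of remainders of xs after removing a subset with sum <= budget
--         if budget < 0: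
--             return set()
--         if not xs:
--             return {()}
--         key = (xs, budget)
--         if key not in memo:
--             x, rest = xs[0], xs[1:]
--             memo[key] = leftovers(rest, budget - x) | {(x,) + l for l in leftovers(rest, budget)}
--         return memo[key]
--
--     states = {tuple(sorted(quantity, reverse=True))}
--     for f in Counter(nums).values():
--         if () in states:
--             return True
--         states = {left for rem in states for left in leftovers(rem, f)}
--     return () in states
-- ===== Notes on version B (the rewrite author's own statement) =====
-- stated objective: alternative
-- what changed: Replaces A's per-customer backtracking over a mutable frequency array with a subset-peeling DP: a deduplicated set of remaining-demand tuples, where each frequency bucket peels off any budget-feasible subset of the remaining quantities (memoized, with budget pruning); B does not mutate `quantity` (A sorts it in place).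
import Mathlib
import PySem

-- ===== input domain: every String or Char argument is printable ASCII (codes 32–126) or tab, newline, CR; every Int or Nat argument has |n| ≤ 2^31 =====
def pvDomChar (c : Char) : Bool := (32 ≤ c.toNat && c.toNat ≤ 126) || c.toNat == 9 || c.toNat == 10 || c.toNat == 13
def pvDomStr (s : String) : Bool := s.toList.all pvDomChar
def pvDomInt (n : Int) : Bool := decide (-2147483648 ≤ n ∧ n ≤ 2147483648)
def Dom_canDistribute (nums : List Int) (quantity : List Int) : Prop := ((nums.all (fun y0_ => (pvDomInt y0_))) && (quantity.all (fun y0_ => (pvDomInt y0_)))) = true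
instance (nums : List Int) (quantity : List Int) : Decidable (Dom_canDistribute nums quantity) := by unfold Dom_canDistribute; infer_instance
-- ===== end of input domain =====

-- B replaces A's per-customer backtracking over buckets with a subset-peeling DP over
-- deduplicated sets of remaining-demand lists (objective: alternative, not measured faster).
-- A sorts `quantity` IN PLACE (observable mutation); B does not mutate its arguments;
-- the equivalence proved here is about the RETURN value only.

-- ===== PORT A =====
-- A's recursive `backtrack(index)` over the sorted quantities, trying every bucket;
-- the in-place decrement/restore of freq[i] is modelled by passing the updated list.
-- (`qty.length ≤ idx` is A's `index == len(quantity)` as a totality guard: calls only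
-- ever reach idx = length exactly.)
def backA (qty : List Int) (freq : List Int) (idx : Nat) : Bool :=
  if qty.length ≤ idx then true
  else
    (List.range freq.length).any (fun i =>
      decide (qty.getD idx 0 ≤ freq.getD i 0) &&
        backA qty (freq.set i (freq.getD i 0 - qty.getD idx 0)) (idx + 1))
  termination_by qty.length - idx
  decreasing_by omega

def canDistribute (nums : List Int) (quantity : List Int) : Bool :=
  backA (PySem.List.sorted quantity (fun x => x) true) ((PySem.Dict.counter nums).values) 0

-- ===== PORT B =====
-- Source B's leftovers(xs, budget): the set of remainders of xs after removing a subset with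
-- running sum within budget (the recursion prunes as soon as the budget goes negative).
-- Source B's `memo` cache only speeds evaluation up and never changes the value; the port is
-- the uncached recursion.
def leftoversB (xs : List Int) (budget : Int) : PySem.Set (List Int) :=
  if budget < 0 then PySem.Set.empty
  else
    match xs with
    | [] => PySem.Set.ofList [[]]
    | x :: rest =>
        PySem.Set.union (leftoversB rest (budget - x))
          (PySem.Set.ofList (List.map (x :: ·) (leftoversB rest budget)))
  termination_by xs.length
  decreasing_by all_goals simp

-- one round of Source B's loop body: states = {left | rem in states, left in leftovers(rem, f)}
def stepB (states : PySem.Set (List Int)) (f : Int) : PySem.Set (List Int) :=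
  states.foldl
    (fun acc rem => (leftoversB rem f).foldl (fun acc2 l => PySem.Set.add acc2 l) acc)
    PySem.Set.empty

-- Source B's `for f in Counter(nums).values()` loop with its early `return True`
def loopB (states : PySem.Set (List Int)) (freqs : List Int) : Bool :=
  match freqs with
  | [] => PySem.Set.contains states []
  | f :: fs => if PySem.Set.contains states [] then true else loopB (stepB states f) fs

def canDistribute_alt (nums : List Int) (quantity : List Int) : Bool :=
  loopB (PySem.Set.ofList [PySem.List.sorted quantity (fun x => x) true])
    ((PySem.Dict.counter nums).values)

-- ===== PRECONDITION & SPEC =====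
def Spec_canDistribute (nums : List Int) (quantity : List Int) (out : Bool) : Prop := out = canDistribute_alt nums quantity
instance (nums : List Int) (quantity : List Int) (out : Bool) : Decidable (Spec_canDistribute nums quantity out) := by unfold Spec_canDistribute; infer_instance

-- ===== CLAIM (what is proved, stated in full; the proofs are below) =====
def Claim_equal_canDistribute : Prop := ∀ (nums : List Int) (quantity : List Int), Dom_canDistribute nums quantity → Spec_canDistribute nums quantity (canDistribute nums quantity)

-- ===== LEMMAS AND PROOFS =====

-- sum of the positive entries of a list (= the largest prefix sum of a descending list)
def posSum : List Int → Int
  | [] => 0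
  | x :: r => max x 0 + posSum r

-- all (taken, left) decompositions (proof-side, unpruned counterpart of leftoversB)
def splitsP : List Int → List (List Int × List Int)
  | [] => [([], [])]
  | x :: rest =>
      ((splitsP rest).map (fun p => (x :: p.1, p.2))) ++
      ((splitsP rest).map (fun p => (p.1, x :: p.2)))

-- "the quantities qs can be served by the buckets fs, each bucket taking a
-- sub-decomposition whose positive part fits" — B's invariant
def Assignable : List Int → List Int → Prop
  | [], qs => qs = []
  | f :: fs, qs => ∃ p ∈ splitsP qs, posSum p.1 ≤ f ∧ Assignable fs p.2

-- A's invariant: serve the quantities one at a time, decrementing the chosen bucket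
def AssignQ : List Int → List Int → Prop
  | _, [] => True
  | freq, q :: qs =>
      ∃ i, i < freq.length ∧ q ≤ freq.getD i 0 ∧
        AssignQ (freq.set i (freq.getD i 0 - q)) qs

theorem posSum_nonneg (t : List Int) : 0 ≤ posSum t := by
  induction t with
  | nil => simp [posSum]
  | cons x r ih => simp only [posSum]; have := le_max_right x (0:Int); omega

theorem posSum_eq_zero (t : List Int) (h : ∀ x ∈ t, x ≤ 0) : posSum t = 0 := by
  induction t with
  | nil => rfl
  | cons x r ih =>
      simp only [posSum]
      have hx : x ≤ 0 := h x (by simp)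
      have h2 : posSum r = 0 := ih (fun y hy => h y (by simp [hy]))
      omega

theorem mem_splitsP_cons (x : Int) (xs : List Int) (p : List Int × List Int) :
    p ∈ splitsP (x :: xs) ↔
      ∃ q ∈ splitsP xs, p = (x :: q.1, q.2) ∨ p = (q.1, x :: q.2) := by
  simp only [splitsP, List.mem_append, List.mem_map]
  constructor
  · rintro (⟨q, hq, rfl⟩ | ⟨q, hq, rfl⟩)
    · exact ⟨q, hq, Or.inl rfl⟩
    · exact ⟨q, hq, Or.inr rfl⟩
  · rintro ⟨q, hq, rfl | rfl⟩
    · exact Or.inl ⟨q, hq, rfl⟩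
    · exact Or.inr ⟨q, hq, rfl⟩

theorem splitsP_sublist (xs : List Int) (p : List Int × List Int) (h : p ∈ splitsP xs) :
    p.1.Sublist xs ∧ p.2.Sublist xs := by
  induction xs generalizing p with
  | nil =>
      simp only [splitsP, List.mem_singleton] at h
      subst h; exact ⟨List.Sublist.refl _, List.Sublist.refl _⟩
  | cons x rest ih =>
      rcases (mem_splitsP_cons x rest p).1 h with ⟨q, hq, rfl | rfl⟩
      · exact ⟨(ih q hq).1.cons₂ x, (ih q hq).2.cons x⟩
      · exact ⟨(ih q hq).1.cons x, (ih q hq).2.cons₂ x⟩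

-- in a DESCENDING list, the prune `budget < 0` cuts exactly the subsets whose
-- positive part exceeds the budget
theorem mem_leftoversB (xs : List Int) (hxs : xs.Pairwise (fun a b => b ≤ a)) :
    ∀ (f : Int) (l : List Int),
      l ∈ leftoversB xs f ↔ ∃ t, (t, l) ∈ splitsP xs ∧ posSum t ≤ f := by
  induction xs with
  | nil =>
      intro f l
      rw [leftoversB]
      split_ifs with hb
      · simp only [PySem.Set.empty, List.not_mem_nil, false_iff, not_exists, not_and]
        intro t ht
        simp only [splitsP, List.mem_singleton, Prod.mk.injEq] at ht
        rw [ht.1]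
        simp only [posSum]
        omega
      · simp only [PySem.Set.mem_ofList, List.mem_singleton, splitsP, Prod.mk.injEq]
        constructor
        · rintro rfl; exact ⟨[], ⟨rfl, rfl⟩, by simp [posSum]; omega⟩
        · rintro ⟨t, ⟨rfl, rfl⟩, _⟩; rfl
  | cons x rest ih =>
      have hhead : ∀ b ∈ rest, b ≤ x := (List.pairwise_cons.1 hxs).1
      have ihr := ih (List.pairwise_cons.1 hxs).2
      intro f l
      rw [leftoversB]
      split_ifs with hb
      · simp only [PySem.Set.empty, List.not_mem_nil, false_iff, not_exists, not_and]
        intro t _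
        have := posSum_nonneg t
        omega
      · simp only [PySem.Set.mem_union, PySem.Set.mem_ofList, List.mem_map]
        constructor
        · intro h
          rcases h with h | ⟨l', hl', rfl⟩
          · rcases (ihr _ _).1 h with ⟨t, ht, hle⟩
            refine ⟨x :: t, (mem_splitsP_cons x rest _).2 ⟨(t, l), ht, Or.inl rfl⟩, ?_⟩
            simp only [posSum]
            by_cases hx : 0 ≤ x
            · omega
            · have : posSum t = 0 := posSum_eq_zero t
                (fun y hy => le_trans (hhead y ((splitsP_sublist rest (t, l) ht).1.mem hy)) (by omega))
              omega
          · rcases (ihr _ _).1 hl' with ⟨t, ht, hle⟩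
            exact ⟨t, (mem_splitsP_cons x rest _).2 ⟨(t, l'), ht, Or.inr rfl⟩, hle⟩
        · rintro ⟨t, ht, hle⟩
          rcases (mem_splitsP_cons x rest (t, l)).1 ht with ⟨q, hq, hp | hp⟩
          · rw [Prod.mk.injEq] at hp
            obtain ⟨rfl, rfl⟩ := hp
            refine Or.inl ((ihr _ _).2 ⟨q.1, by simpa using hq, ?_⟩)
            simp only [posSum] at hle
            by_cases hx : 0 ≤ x
            · omega
            · have : posSum q.1 = 0 := posSum_eq_zero q.1
                (fun y hy => le_trans (hhead y ((splitsP_sublist rest q hq).1.mem hy)) (by omega))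
              omega
          · rw [Prod.mk.injEq] at hp
            obtain ⟨rfl, rfl⟩ := hp
            exact Or.inr ⟨q.2, (ihr _ _).2 ⟨q.1, by simpa using hq, hle⟩, rfl⟩

theorem assignable_nil (fs : List Int) (h : ∀ f ∈ fs, 0 ≤ f) : Assignable fs [] := by
  induction fs with
  | nil => simp [Assignable]
  | cons f fs ih =>
      refine ⟨([], []), by simp [splitsP], ?_, ih (fun g hg => h g (by simp [hg]))⟩
      have := h f (by simp)
      simp only [posSum]
      omega

-- put q into bucket i of fs (B-side composition of an A-side step)
theorem assignable_insert (fs : List Int) : ∀ (i : Nat) (q : Int) (qs : List Int),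
    i < fs.length → q ≤ fs.getD i 0 →
    (0 < q ∨ ((∀ x ∈ qs, x ≤ 0) ∧ 0 ≤ fs.getD i 0)) →
    Assignable (fs.set i (fs.getD i 0 - q)) qs → Assignable fs (q :: qs) := by
  induction fs with
  | nil => intro i q qs hi; simp at hi
  | cons f fs ih =>
      intro i q qs hi hq hside h
      cases i with
      | zero =>
          simp only [List.getD_cons_zero] at hq hside
          simp only [List.getD_cons_zero, List.set_cons_zero] at h
          rcases h with ⟨p, hp, hle, hA⟩
          refine ⟨(q :: p.1, p.2), (mem_splitsP_cons q qs _).2 ⟨p, hp, Or.inl rfl⟩, ?_, hA⟩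
          simp only [posSum]
          by_cases hq0 : 0 < q
          · omega
          · rcases hside with hside | ⟨hall, hf0⟩
            · omega
            · have hz : posSum p.1 = 0 :=
                posSum_eq_zero p.1 (fun y hy => hall y ((splitsP_sublist qs p hp).1.mem hy))
              omega
      | succ i =>
          simp only [List.getD_cons_succ] at hq hside
          simp only [List.getD_cons_succ, List.set_cons_succ] at h
          rcases h with ⟨p, hp, hle, hA⟩
          have hside' : 0 < q ∨ ((∀ x ∈ p.2, x ≤ 0) ∧ 0 ≤ fs.getD i 0) := by
            rcases hside with hs | ⟨hall, hf⟩
            · exact Or.inl hs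
            · exact Or.inr ⟨fun y hy => hall y ((splitsP_sublist qs p hp).2.mem hy), hf⟩
          have hA' : Assignable fs (q :: p.2) :=
            ih i q p.2 (by simpa using hi) hq hside' hA
          exact ⟨(p.1, q :: p.2), (mem_splitsP_cons q qs _).2 ⟨p, hp, Or.inr rfl⟩, hle, hA'⟩

-- extract the bucket that serves the head quantity (A-side step from a B-side witness)
theorem assignable_extract (fs : List Int) : ∀ (q : Int) (qs : List Int),
    (∀ f ∈ fs, 0 ≤ f) → Assignable fs (q :: qs) →
    ∃ i, i < fs.length ∧ q ≤ fs.getD i 0 ∧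
      Assignable (fs.set i (fs.getD i 0 - q)) qs := by
  induction fs with
  | nil => intro q qs _ h; exact absurd h (by simp [Assignable])
  | cons f fs ih =>
      intro q qs hnn h
      rcases h with ⟨p, hp, hle, hA⟩
      rcases (mem_splitsP_cons q qs p).1 hp with ⟨r, hr, hpr | hpr⟩
      · subst hpr
        simp only at hle hA
        have hps := posSum_nonneg r.1
        simp only [posSum] at hle
        refine ⟨0, by simp, by simp only [List.getD_cons_zero]; omega, ?_⟩
        simp only [List.getD_cons_zero, List.set_cons_zero]
        exact ⟨r, hr, by omega, hA⟩
      · subst hpr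
        simp only at hle hA
        rcases ih q r.2 (fun g hg => hnn g (by simp [hg])) hA with ⟨j, hj, hqj, hAj⟩
        refine ⟨j + 1, by simpa using hj, by simpa using hqj, ?_⟩
        simp only [List.getD_cons_succ, List.set_cons_succ]
        exact ⟨(r.1, r.2), hr, hle, hAj⟩

theorem assignQ_iff_assignable (qs : List Int) : ∀ (fs : List Int),
    (∀ f ∈ fs, 0 ≤ f) → qs.Pairwise (fun a b => b ≤ a) →
    (AssignQ fs qs ↔ Assignable fs qs) := by
  induction qs with
  | nil =>
      intro fs hnn _
      exact ⟨fun _ => assignable_nil fs hnn, fun _ => trivial⟩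
  | cons q qs ih =>
      intro fs hnn hpw
      have hpw' := (List.pairwise_cons.1 hpw).2
      have hhead := (List.pairwise_cons.1 hpw).1
      constructor
      · rintro ⟨i, hi, hq, hA⟩
        have hnn' : ∀ g ∈ fs.set i (fs.getD i 0 - q), 0 ≤ g := by
          intro g hg
          rcases List.mem_or_eq_of_mem_set hg with hg | rfl
          · exact hnn g hg
          · have : 0 ≤ fs.getD i 0 := by
              rw [List.getD_eq_getElem fs 0 hi]
              exact hnn _ (List.getElem_mem hi)
            omega
        have hA' := (ih _ hnn' hpw').1 hA
        refine assignable_insert fs i q qs hi hq ?_ hA'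
        by_cases hq0 : 0 < q
        · exact Or.inl hq0
        · refine Or.inr ⟨fun x hx => le_trans (hhead x hx) (by omega), ?_⟩
          rw [List.getD_eq_getElem fs 0 hi]
          exact hnn _ (List.getElem_mem hi)
      · intro hA
        rcases assignable_extract fs q qs hnn hA with ⟨i, hi, hq, hA'⟩
        have hnn' : ∀ g ∈ fs.set i (fs.getD i 0 - q), 0 ≤ g := by
          intro g hg
          rcases List.mem_or_eq_of_mem_set hg with hg | rfl
          · exact hnn g hg
          · omega
        exact ⟨i, hi, hq, (ih _ hnn' hpw').2 hA'⟩

theorem backA_iff (qty : List Int) : ∀ (n idx : Nat), qty.length - idx = n →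
    ∀ (freq : List Int), ((backA qty freq idx) = true ↔ AssignQ freq (qty.drop idx)) := by
  intro n
  induction n with
  | zero =>
      intro idx h freq
      have hle : qty.length ≤ idx := by omega
      rw [backA]
      simp [hle, List.drop_eq_nil_of_le hle, AssignQ]
  | succ n ihn =>
      intro idx h freq
      have hlt : idx < qty.length := by omega
      rw [backA]
      rw [if_neg (by omega : ¬ qty.length ≤ idx)]
      rw [List.drop_eq_getElem_cons hlt]
      simp only [AssignQ, List.any_eq_true, List.mem_range, Bool.and_eq_true,
        decide_eq_true_eq]
      have hget : qty.getD idx 0 = qty[idx] := List.getD_eq_getElem qty 0 hlt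
      constructor
      · rintro ⟨i, hi, hq, hrec⟩
        rw [hget] at hq hrec
        exact ⟨i, hi, hq, (ihn (idx + 1) (by omega) _).1 hrec⟩
      · rintro ⟨i, hi, hq, hrec⟩
        refine ⟨i, hi, ?_, ?_⟩
        · rw [hget]; exact hq
        · rw [hget]
          exact (ihn (idx + 1) (by omega) _).2 hrec

theorem mem_foldl_add (x : List Int) (ls : List (List Int)) :
    ∀ (acc : PySem.Set (List Int)),
      x ∈ ls.foldl (fun a l => PySem.Set.add a l) acc ↔ x ∈ acc ∨ x ∈ ls := by
  induction ls with
  | nil => intro acc; simp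
  | cons l ls ih =>
      intro acc
      rw [List.foldl_cons, ih, PySem.Set.mem_add]
      constructor
      · rintro ((h | h) | h)
        · exact Or.inl h
        · exact Or.inr (by simp [h])
        · exact Or.inr (by simp [h])
      · rintro (h | h)
        · exact Or.inl (Or.inl h)
        · rcases List.mem_cons.1 h with rfl | h
          · exact Or.inl (Or.inr rfl)
          · exact Or.inr h

theorem mem_stepB_aux (f : Int) (x : List Int) (l : List (List Int)) :
    ∀ (acc : PySem.Set (List Int)),
      x ∈ l.foldl (fun acc rem => (leftoversB rem f).foldl (fun a l => PySem.Set.add a l) acc) acc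
        ↔ x ∈ acc ∨ ∃ rem ∈ l, x ∈ leftoversB rem f := by
  induction l with
  | nil => intro acc; simp
  | cons rem l ih =>
      intro acc
      rw [List.foldl_cons, ih, mem_foldl_add]
      constructor
      · rintro ((h | h) | ⟨r, hr, hp⟩)
        · exact Or.inl h
        · exact Or.inr ⟨rem, by simp, h⟩
        · exact Or.inr ⟨r, by simp [hr], hp⟩
      · rintro (h | ⟨r, hr, hp⟩)
        · exact Or.inl (Or.inl h)
        · rcases List.mem_cons.1 hr with rfl | hr
          · exact Or.inl (Or.inr hp)
          · exact Or.inr ⟨r, hr, hp⟩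

theorem mem_stepB (states : PySem.Set (List Int)) (f : Int) (x : List Int) :
    x ∈ stepB states f ↔ ∃ rem ∈ states, x ∈ leftoversB rem f := by
  unfold stepB
  rw [mem_stepB_aux]
  simp [PySem.Set.empty]

theorem loopB_iff (fs : List Int) : ∀ (states : PySem.Set (List Int)),
    (∀ f ∈ fs, 0 ≤ f) →
    (∀ qs ∈ states, qs.Pairwise (fun a b : Int => b ≤ a)) →
    (loopB states fs = true ↔ ∃ qs ∈ states, Assignable fs qs) := by
  induction fs with
  | nil =>
      intro states _ _
      simp only [loopB, PySem.Set.contains_iff]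
      constructor
      · intro h; exact ⟨[], h, rfl⟩
      · rintro ⟨qs, hqs, h⟩
        have : qs = [] := h
        rwa [this] at hqs
  | cons f fs ih =>
      intro states hnn hsrt
      by_cases hc : PySem.Set.contains states [] = true
      · simp only [loopB, hc, if_true, true_iff]
        exact ⟨[], (PySem.Set.contains_iff _ _).1 hc, assignable_nil _ hnn⟩
      · simp only [loopB, hc, if_false, Bool.false_eq_true]
        have hsrt' : ∀ qs ∈ stepB states f, qs.Pairwise (fun a b : Int => b ≤ a) := by
          intro qs hqs
          rcases (mem_stepB states f qs).1 hqs with ⟨rem, hrem, hmem⟩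
          rcases (mem_leftoversB rem (hsrt rem hrem) f qs).1 hmem with ⟨t, ht, _⟩
          exact (hsrt rem hrem).sublist (splitsP_sublist rem (t, qs) ht).2
        rw [ih (stepB states f) (fun g hg => hnn g (by simp [hg])) hsrt']
        constructor
        · rintro ⟨qs, hmem, hA⟩
          rcases (mem_stepB states f qs).1 hmem with ⟨rem, hrem, hl⟩
          rcases (mem_leftoversB rem (hsrt rem hrem) f qs).1 hl with ⟨t, ht, hle⟩
          exact ⟨rem, hrem, (t, qs), ht, hle, hA⟩
        · rintro ⟨rem, hrem, p, hps, hle, hA⟩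
          refine ⟨p.2, (mem_stepB states f p.2).2 ⟨rem, hrem, ?_⟩, hA⟩
          exact (mem_leftoversB rem (hsrt rem hrem) f p.2).2 ⟨p.1, by simpa using hps, hle⟩

theorem counter_values_nonneg (nums : List Int) :
    ∀ v ∈ (PySem.Dict.counter nums).values, 0 ≤ v := by
  intro v hv
  have h : (PySem.Dict.counter nums).items
      = (PySem.Set.ofList nums).map (fun k => (k, (nums.count k : Int))) :=
    PySem.Dict.items_counter nums
  simp only [PySem.Dict.values, h, List.map_map, List.mem_map] at hv
  rcases hv with ⟨k, _, rfl⟩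
  simp

-- ===== VERDICT (by name: the statement is the Claim_ definition above) =====
theorem canDistribute_spec : Claim_equal_canDistribute := by
  intro nums quantity _
  unfold Spec_canDistribute canDistribute canDistribute_alt
  set sq := PySem.List.sorted quantity (fun x => x) true with hsq
  set freq := (PySem.Dict.counter nums).values with hfreq
  have hnn : ∀ f ∈ freq, 0 ≤ f := counter_values_nonneg nums
  have hpw : sq.Pairwise (fun a b => b ≤ a) := by
    simpa using PySem.List.sorted_pairwise_rev (xs := quantity) (key := fun x => x)
  have h1 : (backA sq freq 0 = true) ↔ Assignable freq sq := by
    rw [backA_iff sq sq.length 0 (by omega) freq, List.drop_zero]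
    exact assignQ_iff_assignable sq freq hnn hpw
  have h2 : (loopB (PySem.Set.ofList [sq]) freq = true) ↔ Assignable freq sq := by
    rw [loopB_iff freq _ hnn]
    · constructor
      · rintro ⟨qs, hqs, h⟩
        have hq : qs = sq := by simpa [PySem.Set.mem_ofList] using hqs
        rwa [hq] at h
      · intro h; exact ⟨sq, by simp [PySem.Set.mem_ofList], h⟩
    · intro qs hqs
      have : qs = sq := by simpa [PySem.Set.mem_ofList] using hqs
      rw [this]; exact hpw
  rw [Bool.eq_iff_iff, h1, h2]
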